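-- pv_equiv track=rewrite | github.com/ottrp0p/sm-trance-ml | src/feature_processing/clean.py | find_lowest_representation
-- ===== SOURCE A (Python) =====
-- from typing import Dict, List, Any, Optional, Tuple
--
-- def find_lowest_representation(measure: List[str]) -> int:
--     """
--     Find the lowest quantization level that can represent this measure.
--
--     Args:
--         measure: List of stepchart strings representing a measure
--
--     Returns:
--         The lowest quantization level (4, 8, 12, 16, 24) or original length if no simplification possible
--     """
--     measure_length = len(measure)
--     quantization_attempts = [4, 8, 12, 16, 24]
--
--     for quantization in quantization_attempts:
--         # Check if measure length is divisible by quantization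
--         if measure_length % quantization != 0:
--             continue
--
--         # Calculate step size
--         step_size = measure_length // quantization
--
--         # Check if all non-quantized positions are "0000"
--         success = True
--         for i in range(measure_length):
--             if i % step_size != 0:  # Not a quantization point
--                 if measure[i] != "0000":
--                     success = False
--                     break
--
--         if success:
--             return quantization
--
--     # No simplification possible, return original length
--     return measure_length
-- ===== SOURCE B (Python) =====
-- def _gcd(a, b):
--     while b:
--         a, b = b, a % b
--     return a
--
-- def find_lowest_representation(measure):
--     """Reduce the measure to a single number: the gcd of the indices of the
--     non-"0000" rows.  A level q (with n % q == 0) can represent the measure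
--     iff its grid step n//q divides that gcd, so each level is a single
--     divisibility test instead of a scan."""
--     n = len(measure)
--     g = 0
--     for i, s in enumerate(measure):
--         if s != "0000":
--             g = _gcd(g, i)
--     for q in (4, 8, 12, 16, 24):
--         if n % q == 0:
--             step = n // q
--             if _gcd(step, g) == step:
--                 return q
--     return n
-- ===== Notes on version B (the rewrite author's own statement) =====
-- stated objective: alternative
-- what changed: B folds the indices of the non-'0000' rows into a single gcd (hand-written Euclid) and tests each quantization level with one divisibility check gcd(step,g)==step, instead of A's per-level scan over every position with a break.
import Mathlib
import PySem

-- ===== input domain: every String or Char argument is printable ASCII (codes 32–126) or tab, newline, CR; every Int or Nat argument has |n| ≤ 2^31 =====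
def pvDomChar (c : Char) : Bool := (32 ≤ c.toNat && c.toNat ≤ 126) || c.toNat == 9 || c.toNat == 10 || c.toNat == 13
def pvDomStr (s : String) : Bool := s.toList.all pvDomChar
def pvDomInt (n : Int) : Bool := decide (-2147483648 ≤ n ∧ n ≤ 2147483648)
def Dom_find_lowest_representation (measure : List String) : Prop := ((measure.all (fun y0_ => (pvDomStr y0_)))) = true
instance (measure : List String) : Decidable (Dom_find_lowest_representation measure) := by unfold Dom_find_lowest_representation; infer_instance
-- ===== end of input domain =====

-- B replaces A's per-level scan of every position by folding the nonzero row
-- indices into one gcd and testing each level with a single divisibility check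
-- (objective: alternative algorithm, similar cost).

-- ===== PORT A =====
-- A: for each level, scan every index of the measure, breaking on the first
-- non-"0000" entry off the grid (the break is the early `false` return here).
def pvCheckA (measure : List String) (step : Int) : List Int → Bool
  | [] => true
  | i :: rest =>
    if PySem.Int.mod i step ≠ 0 then
      if PySem.List.pyGetD measure i "" ≠ "0000" then false
      else pvCheckA measure step rest
    else pvCheckA measure step rest

def pvGoA (measure : List String) (n : Int) : List Int → Int
  | [] => n
  | q :: qs =>
    if PySem.Int.mod n q ≠ 0 then pvGoA measure n qs
    else
      if pvCheckA measure (PySem.Int.floordiv n q) (PySem.List.pyRange 0 n 1) then q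
      else pvGoA measure n qs

def find_lowest_representation (measure : List String) : Int :=
  pvGoA measure (measure.length : Int) [4, 8, 12, 16, 24]

-- ===== PORT B =====
-- Euclid's gcd with Python's `%` (Source B's hand-written _gcd, step for step).
def pvGcdTerm (a b : Int) (hb : b ≠ 0) : (PySem.Int.mod a b).natAbs < b.natAbs := by
  rcases lt_or_gt_of_ne hb with h | h
  · have := PySem.Int.mod_neg_bounds a h
    omega
  · have h1 := PySem.Int.mod_nonneg a h
    have h2 := PySem.Int.mod_lt a h
    omega

def pvGcd (a b : Int) : Int :=
  if hb : b ≠ 0 then pvGcd b (PySem.Int.mod a b) else a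
  termination_by b.natAbs
  decreasing_by exact pvGcdTerm a b hb

-- g = gcd of the indices of the non-"0000" rows (0 if there are none).
def pvG (measure : List String) : Int :=
  (PySem.List.enumerate measure 0).foldl
    (fun g p => if p.2 ≠ "0000" then pvGcd g p.1 else g) 0

def pvGoB (g n : Int) : List Int → Int
  | [] => n
  | q :: qs =>
    if PySem.Int.mod n q = 0 then
      if pvGcd (PySem.Int.floordiv n q) g = PySem.Int.floordiv n q then q
      else pvGoB g n qs
    else pvGoB g n qs

def find_lowest_representation_alt (measure : List String) : Int :=
  pvGoB (pvG measure) (measure.length : Int) [4, 8, 12, 16, 24]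

-- ===== PRECONDITION & SPEC =====
def Spec_find_lowest_representation (measure : List String) (out : Int) : Prop := out = find_lowest_representation_alt measure
instance (measure : List String) (out : Int) : Decidable (Spec_find_lowest_representation measure out) := by unfold Spec_find_lowest_representation; infer_instance

-- ===== CLAIM (what is proved, stated in full; the proofs are below) =====
def Claim_equal_find_lowest_representation : Prop := ∀ (measure : List String), Dom_find_lowest_representation measure → Spec_find_lowest_representation measure (find_lowest_representation measure)

-- ===== LEMMAS AND PROOFS =====

lemma pvGcd_dvd_iff (d : Int) : ∀ (a b : Int), d ∣ pvGcd a b ↔ d ∣ a ∧ d ∣ b := by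
  intro a b
  induction a, b using pvGcd.induct with
  | case1 a b hb ih =>
    rw [pvGcd, dif_pos hb, ih]
    have hsum := PySem.Int.floordiv_mul_add_mod a b
    constructor
    · rintro ⟨h1, h2⟩
      exact ⟨by rw [← hsum]; exact dvd_add (Dvd.dvd.mul_left h1 _) h2, h1⟩
    · rintro ⟨h1, h2⟩
      refine ⟨h2, ?_⟩
      have : PySem.Int.mod a b = a - PySem.Int.floordiv a b * b := by omega
      rw [this]
      exact dvd_sub h1 (Dvd.dvd.mul_left h2 _)
  | case2 a b hb =>
    have hb0 : b = 0 := by omega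
    rw [pvGcd, dif_neg hb, hb0]
    simp

lemma pvGcd_nonneg : ∀ (a b : Int), 0 ≤ a → 0 ≤ b → 0 ≤ pvGcd a b := by
  intro a b
  induction a, b using pvGcd.induct with
  | case1 a b hb ih =>
    intro ha hbn
    rw [pvGcd, dif_pos hb]
    exact ih hbn (PySem.Int.mod_nonneg a (by omega))
  | case2 a b hb =>
    intro ha _
    rw [pvGcd, dif_neg hb]
    exact ha

lemma pvGcd_eq_left_iff (s g : Int) (hs : 0 ≤ s) (hg : 0 ≤ g) :
    pvGcd s g = s ↔ s ∣ g := by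
  constructor
  · intro h
    have := (pvGcd_dvd_iff (pvGcd s g) s g).mp dvd_rfl
    rw [h] at this
    exact this.2
  · intro h
    have h1 : pvGcd s g ∣ s := ((pvGcd_dvd_iff (pvGcd s g) s g).mp dvd_rfl).1
    have h2 : s ∣ pvGcd s g := (pvGcd_dvd_iff s s g).mpr ⟨dvd_rfl, h⟩
    exact Int.dvd_antisymm (pvGcd_nonneg s g hs hg) hs h1 h2

lemma dvd_foldl_iff (s : Int) (L : List (Int × String)) : ∀ (g0 : Int),
    s ∣ L.foldl (fun g p => if p.2 ≠ "0000" then pvGcd g p.1 else g) g0 ↔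
      s ∣ g0 ∧ ∀ p ∈ L, p.2 ≠ "0000" → s ∣ p.1 := by
  induction L with
  | nil => simp
  | cons p rest ih =>
    intro g0
    simp only [List.foldl_cons, List.mem_cons]
    by_cases hp : p.2 ≠ "0000"
    · rw [if_pos hp, ih, pvGcd_dvd_iff]
      constructor
      · rintro ⟨⟨h1, h2⟩, h3⟩
        refine ⟨h1, fun q hq => ?_⟩
        rcases hq with rfl | hq'
        · exact fun _ => h2
        · exact h3 q hq'
      · rintro ⟨h1, h2⟩
        exact ⟨⟨h1, h2 p (Or.inl rfl) hp⟩, fun q hq => h2 q (Or.inr hq)⟩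
    · rw [if_neg hp, ih]
      constructor
      · rintro ⟨h1, h2⟩
        refine ⟨h1, fun q hq => ?_⟩
        rcases hq with rfl | hq'
        · exact fun h => absurd h hp
        · exact h2 q hq'
      · rintro ⟨h1, h2⟩
        exact ⟨h1, fun q hq => h2 q (Or.inr hq)⟩

lemma foldl_gcd_nonneg (L : List (Int × String)) : ∀ (g0 : Int), 0 ≤ g0 →
    (∀ p ∈ L, 0 ≤ p.1) →
    0 ≤ L.foldl (fun g p => if p.2 ≠ "0000" then pvGcd g p.1 else g) g0 := by
  induction L with
  | nil => intro g0 h _; simpa using h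
  | cons p rest ih =>
    intro g0 h hall
    simp only [List.foldl_cons]
    by_cases hp : p.2 ≠ "0000"
    · rw [if_pos hp]
      exact ih _ (pvGcd_nonneg _ _ h (hall p (List.mem_cons_self ..))) (fun q hq => hall q (List.mem_cons_of_mem _ hq))
    · rw [if_neg hp]
      exact ih _ h (fun q hq => hall q (List.mem_cons_of_mem _ hq))

lemma pvG_nonneg (measure : List String) : 0 ≤ pvG measure := by
  apply foldl_gcd_nonneg _ _ le_rfl
  intro p hp
  rcases (PySem.List.mem_enumerate_iff measure 0 p).mp hp with ⟨k, hk, rfl⟩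
  simp

lemma pvCheckA_eq_all (measure : List String) (step : Int) (L : List Int) :
    pvCheckA measure step L
      = L.all (fun i => (PySem.Int.mod i step == 0)
          || (PySem.List.pyGetD measure i "" == "0000")) := by
  induction L with
  | nil => rfl
  | cons i rest ih =>
    simp only [pvCheckA, List.all_cons, ih]
    split_ifs with h1 h2 <;> simp_all

lemma pvCheck_core (measure : List String) (step : Int) (hstep : 0 ≤ step) :
    (pvCheckA measure step (PySem.List.pyRange 0 (measure.length : Int) 1) = true)
      ↔ pvGcd step (pvG measure) = step := by
  rw [pvCheckA_eq_all, pvGcd_eq_left_iff step _ hstep (pvG_nonneg measure)]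
  rw [pvG, PySem.List.enumerate_eq_map_pyRange measure ""]
  have hlen : PySem.List.len measure = (measure.length : Int) := by
    simp [PySem.List.len]
  rw [hlen, dvd_foldl_iff]
  simp only [List.all_eq_true, Bool.or_eq_true, beq_iff_eq, dvd_zero, true_and,
    List.mem_map, forall_exists_index, and_imp]
  constructor
  · intro h p i hi hpi hne
    rcases (h i hi) with h0 | h0
    · subst hpi; exact (PySem.Int.mod_eq_zero_iff_dvd i step).mp h0
    · subst hpi; exact absurd h0 hne
  · intro h i hi
    by_cases hne : PySem.List.pyGetD measure i "" = "0000"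
    · exact Or.inr hne
    · exact Or.inl ((PySem.Int.mod_eq_zero_iff_dvd i step).mpr
        (h (i, PySem.List.pyGetD measure i "") i hi rfl hne))

lemma step_nonneg (n q : Int) (hn : 0 ≤ n) (hq : 0 < q) : 0 ≤ PySem.Int.floordiv n q := by
  rw [PySem.Int.floordiv_eq_ediv_of_pos hq]
  exact Int.ediv_nonneg hn (le_of_lt hq)

lemma pvGo_eq (measure : List String) : ∀ (qs : List Int), (∀ q ∈ qs, 0 < q) →
    pvGoA measure (measure.length : Int) qs
      = pvGoB (pvG measure) (measure.length : Int) qs := by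
  intro qs
  induction qs with
  | nil => intro _; rfl
  | cons q rest ih =>
    intro hq
    have hqpos : 0 < q := hq q (List.mem_cons_self ..)
    have hrest := ih (fun r hr => hq r (List.mem_cons_of_mem _ hr))
    simp only [pvGoA, pvGoB]
    have hcore := pvCheck_core measure (PySem.Int.floordiv (measure.length : Int) q)
      (step_nonneg _ _ (by positivity) hqpos)
    split_ifs with h1 h2 h3 h3 <;> simp_all

-- ===== VERDICT (by name: the statement is the Claim_ definition above) =====
theorem find_lowest_representation_spec : Claim_equal_find_lowest_representation := by
  intro measure _
  unfold Spec_find_lowest_representation find_lowest_representation find_lowest_representation_alt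
  exact pvGo_eq measure _ (by decide)
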